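-- pv_equiv track=rewrite | github.com/GreyGrisGrey/Advent-of-Code | 2015/day7.py | assignVal
-- ===== SOURCE A (Python) =====
-- def assignVal(z):
--     num = []
--     for i in range(16):
--         if i < 16 - len(z):
--             num.append("0")
--         else:
--             num.append(z[15-i])
--     return num
-- ===== SOURCE B (Python) =====
-- def assignVal(z):
--     return (["0"] * 16 + list(reversed(z)))[-16:]
-- ===== Notes on version B (the rewrite author's own statement) =====
-- stated objective: idiomatic
-- what changed: Replaces the 16-iteration loop with per-index branching by a single closed-form slicing expression: prepend sixteen zero strings to the reversed input and keep the last 16 elements.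
import Mathlib
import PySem

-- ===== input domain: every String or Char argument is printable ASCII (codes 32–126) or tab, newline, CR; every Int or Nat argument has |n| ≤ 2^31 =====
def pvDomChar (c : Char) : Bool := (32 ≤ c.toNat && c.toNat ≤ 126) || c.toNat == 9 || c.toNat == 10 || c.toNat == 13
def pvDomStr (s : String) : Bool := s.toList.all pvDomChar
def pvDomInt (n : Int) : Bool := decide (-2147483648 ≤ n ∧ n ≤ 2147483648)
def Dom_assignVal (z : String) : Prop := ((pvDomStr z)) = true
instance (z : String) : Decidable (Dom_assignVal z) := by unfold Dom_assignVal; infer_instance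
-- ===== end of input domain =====

-- ===== PORT A =====
-- B left-pads the reversed input with "0" to 16 elements via one slice instead of A's
-- indexed 16-step loop with a per-index branch (objective: idiomatic).
def assignVal (z : String) : List String :=
  (PySem.List.pyRange 0 16 1).foldl
    (fun num i =>
      if i < 16 - PySem.Str.len z then
        num ++ ["0"]
      else
        -- z[15-i]: whenever this branch runs the index is in range, so the
        -- none arm (Python's IndexError) is unreachable
        num ++ [match PySem.Str.pyGet? z (15 - i) with
                | some c => String.ofList [c]
                | none => ""])
    []

-- ===== PORT B =====
def assignVal_alt (z : String) : List String :=
  PySem.List.slice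
    (List.replicate 16 "0" ++ z.toList.reverse.map (fun c => String.ofList [c]))
    (some (-16)) none

-- ===== PRECONDITION & SPEC =====
def Spec_assignVal (z : String) (out : List String) : Prop := out = assignVal_alt z
instance (z : String) (out : List String) : Decidable (Spec_assignVal z out) := by unfold Spec_assignVal; infer_instance

-- ===== CLAIM (what is proved, stated in full; the proofs are below) =====
def Claim_equal_assignVal : Prop := ∀ (z : String), Dom_assignVal z → Spec_assignVal z (assignVal z)

-- ===== LEMMAS AND PROOFS =====

-- A's loop as a map over range 16
theorem assignVal_eq_map (z : String) :
    assignVal z = (List.range 16).map (fun k =>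
      if k + z.length < 16 then "0"
      else match z.toList[15 - k]? with
           | some c => String.ofList [c]
           | none => "") := by
  unfold assignVal
  have hf : (fun (num : List String) (i : Int) =>
      if i < 16 - PySem.Str.len z then num ++ ["0"]
      else num ++ [match PySem.Str.pyGet? z (15 - i) with
                   | some c => String.ofList [c]
                   | none => ""]) =
      (fun (num : List String) (i : Int) =>
        num ++ [if i < 16 - PySem.Str.len z then "0"
                else match PySem.Str.pyGet? z (15 - i) with
                     | some c => String.ofList [c]
                     | none => ""]) := by
    funext num i; split <;> rfl
  have hzl : z.toList.length = z.length := by simp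
  rw [hf, PySem.List.foldl_append_singleton_eq_map, PySem.List.pyRange_one]
  rw [List.nil_append, List.map_map]
  apply List.map_congr_left
  intro k hk
  have hk16 : k < 16 := List.mem_range.mp hk
  simp only [Function.comp_apply, zero_add]
  by_cases hc : k + z.length < 16
  · rw [if_pos, if_pos hc]
    simp only [PySem.Str.len_eq]
    push_cast [hzl]; omega
  · rw [if_neg, if_neg hc]
    · have hidx : (15 : Int) - (k : Int) = ((15 - k : Nat) : Int) := by omega
      rw [hidx]
      simp
    · simp only [PySem.Str.len_eq]
      push_cast [hzl]; omega

theorem assignVal_alt_eq (z : String) :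
    assignVal_alt z =
      (List.replicate 16 "0" ++ z.toList.reverse.map (fun c => String.ofList [c])).drop
        z.toList.length := by
  unfold assignVal_alt
  rw [PySem.List.slice_from_neg_ofNat _ 16 (by omega)]
  congr 1
  simp

-- ===== VERDICT (by name: the statement is the Claim_ definition above) =====
theorem assignVal_spec : Claim_equal_assignVal := by
  intro z _
  show assignVal z = assignVal_alt z
  rw [assignVal_eq_map, assignVal_alt_eq]
  have hzl : z.toList.length = z.length := by simp
  apply List.ext_getElem
  · simp only [List.length_map, List.length_range, List.length_drop, List.length_append,
      List.length_replicate, List.length_reverse, String.length_toList]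
    omega
  · intro k h1 h2
    have hk16 : k < 16 := by simpa using h1
    simp only [List.getElem_map, List.getElem_range, List.getElem_drop]
    by_cases hc : k + z.length < 16
    · rw [if_pos hc, List.getElem_append_left (by simp only [List.length_replicate]; omega)]
      exact (List.getElem_replicate _).symm
    · rw [if_neg hc, List.getElem_append_right (by simp only [List.length_replicate]; omega)]
      have hlt : 15 - k < z.toList.length := by omega
      rw [List.getElem?_eq_getElem hlt]
      show String.ofList [z.toList[15 - k]] = _
      simp only [List.getElem_map, List.getElem_reverse, List.length_replicate,
        hzl]
      simp only [show z.length - 1 - (z.length + k - 16) = 15 - k from by omega]
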